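-- pv_equiv track=rewrite | github.com/ashwathkkp/mm | divided.py | newton_divided_eq
-- ===== SOURCE A (Python) =====
-- def newton_divided_eq(x_pred, x, table):
--   y_pred = table[0][0]
--   for i in range(1, len(table)-1):
--     temp = 1
--     for j in range(0, i):
--       temp = temp * ( x_pred - x[j] )
--     y_pred =  y_pred + (temp * table[i][0])
--   return y_pred
-- ===== SOURCE B (Python) =====
-- def newton_divided_eq(x_pred, x, table):
--     # Horner scheme evaluated back-to-front: nested factoring of the Newton form,
--     # no basis product is ever materialised (one multiply + add per coefficient).
--     n = len(table)
--     if n <= 2: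
--         return table[0][0]
--     r = table[n - 2][0]
--     for i in range(n - 3, 0, -1):
--         r = table[i][0] + (x_pred - x[i]) * r
--     return table[0][0] + (x_pred - x[0]) * r
-- ===== Notes on version B (the rewrite author's own statement) =====
-- stated objective: faster
-- what changed: B evaluates the Newton form by a back-to-front Horner scheme (nested factoring, one multiply per coefficient) instead of A's forward loop that recomputes the basis product from scratch at every term.
import Mathlib
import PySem

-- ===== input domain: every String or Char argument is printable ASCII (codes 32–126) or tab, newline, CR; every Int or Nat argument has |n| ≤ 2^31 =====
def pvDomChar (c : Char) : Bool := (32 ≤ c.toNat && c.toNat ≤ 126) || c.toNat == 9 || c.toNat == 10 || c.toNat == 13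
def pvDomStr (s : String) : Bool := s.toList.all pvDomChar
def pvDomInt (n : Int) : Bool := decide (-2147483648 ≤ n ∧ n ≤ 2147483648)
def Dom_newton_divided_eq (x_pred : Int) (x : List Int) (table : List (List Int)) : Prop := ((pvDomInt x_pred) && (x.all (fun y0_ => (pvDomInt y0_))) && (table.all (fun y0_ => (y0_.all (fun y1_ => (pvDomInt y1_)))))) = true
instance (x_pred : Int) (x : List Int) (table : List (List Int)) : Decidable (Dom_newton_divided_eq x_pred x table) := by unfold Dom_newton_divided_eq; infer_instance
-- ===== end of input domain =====

-- B evaluates the Newton form by a back-to-front Horner scheme (one multiply per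
-- coefficient) instead of A's forward loop recomputing each basis product (faster, asymptotic).

-- ===== PORT A =====
-- Literal port of A: outer loop over range(1, len(table)-1); at each i the inner loop
-- recomputes temp = prod_{j<i} (x_pred - x[j]) from scratch.  Indexing uses pyGetD;
-- Pre_ guarantees every index is in range, so the default is never consulted there.
def newton_divided_eq (x_pred : Int) (x : List Int) (table : List (List Int)) : Int :=
  let y0 : Int := PySem.List.pyGetD (PySem.List.pyGetD table 0 []) 0 0
  (PySem.List.pyRange 1 ((table.length : Int) - 1) 1).foldl
    (fun y_pred i =>
      let temp := (PySem.List.pyRange 0 i 1).foldl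
        (fun temp j => temp * (x_pred - PySem.List.pyGetD x j 0)) 1
      y_pred + temp * PySem.List.pyGetD (PySem.List.pyGetD table i []) 0 0) y0

-- ===== PORT B =====
-- Literal port of B: early return for n ≤ 2, then a countdown loop range(n-3, 0, -1)
-- carrying the single Horner accumulator r, then the closing combination with x[0].
def newton_divided_eq_alt (x_pred : Int) (x : List Int) (table : List (List Int)) : Int :=
  let n : Int := (table.length : Int)
  if n ≤ 2 then
    PySem.List.pyGetD (PySem.List.pyGetD table 0 []) 0 0
  else
    let r : Int := (PySem.List.pyRange (n - 3) 0 (-1)).foldl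
      (fun r i =>
        PySem.List.pyGetD (PySem.List.pyGetD table i []) 0 0
          + (x_pred - PySem.List.pyGetD x i 0) * r)
      (PySem.List.pyGetD (PySem.List.pyGetD table (n - 2) []) 0 0)
    PySem.List.pyGetD (PySem.List.pyGetD table 0 []) 0 0
      + (x_pred - PySem.List.pyGetD x 0 0) * r

-- ===== PRECONDITION & SPEC =====
-- Pre_ excludes exactly the inputs where Python A raises IndexError (empty table,
-- an empty row among rows 0..len(table)-2, or x shorter than len(table)-2);
-- B raises on exactly the same inputs.
def Pre_newton_divided_eq (x_pred : Int) (x : List Int) (table : List (List Int)) : Prop :=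
  table ≠ [] ∧ (∀ i < max 1 (table.length - 1), table.getD i [] ≠ []) ∧
    table.length - 2 ≤ x.length
instance (x_pred : Int) (x : List Int) (table : List (List Int)) : Decidable (Pre_newton_divided_eq x_pred x table) := by unfold Pre_newton_divided_eq; infer_instance

def pvWitness_newton_divided_eq : Int × List Int × List (List Int) :=
  (2, [0, 1], [[1], [2], [3], [4]])

def Spec_newton_divided_eq (x_pred : Int) (x : List Int) (table : List (List Int)) (out : Int) : Prop := out = newton_divided_eq_alt x_pred x table
instance (x_pred : Int) (x : List Int) (table : List (List Int)) (out : Int) : Decidable (Spec_newton_divided_eq x_pred x table out) := by unfold Spec_newton_divided_eq; infer_instance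

-- ===== CLAIM =====
def Claim_equal_newton_divided_eq : Prop := ∀ (x_pred : Int) (x : List Int) (table : List (List Int)), Dom_newton_divided_eq x_pred x table → Pre_newton_divided_eq x_pred x table → Spec_newton_divided_eq x_pred x table (newton_divided_eq x_pred x table)

-- ===== LEMMAS AND PROOFS =====

-- pvProd f k = value of A's inner loop for bound k
def pvProd (f : Int → Int) (k : Int) : Int :=
  (PySem.List.pyRange 0 k 1).foldl (fun t j => t * f j) 1

theorem pvProd_succ (f : Int → Int) (k : Int) (hk : 1 ≤ k) :
    pvProd f k = pvProd f (k - 1) * f (k - 1) := by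
  unfold pvProd
  have h : k = (k - 1) + 1 := by omega
  rw [h, PySem.List.pyRange_one_succ_right (by omega : (0 : Int) ≤ k - 1),
    List.foldl_append]
  simp

-- Horner reference: pvH f g c k = g k + f k * (g (k+1) + f (k+1) * (… g (k+c)))
def pvH (f g : Int → Int) : Nat → Int → Int
  | 0, k => g k
  | c + 1, k => g k + f k * pvH f g c (k + 1)

-- A's forward fold, from k to m inclusive, in terms of pvH
theorem pvA_fold (f g : Int → Int) : ∀ (c : Nat) (k y : Int), 1 ≤ k → (k + c : Int) = k + c →
    (PySem.List.pyRange k (k + (c : Int) + 1) 1).foldl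
      (fun y i => y + pvProd f i * g i) y
    = y + pvProd f k * pvH f g c k := by
  intro c
  induction c with
  | zero =>
    intro k y hk _
    rw [show (k + ((0:Nat) : Int) + 1) = k + 1 by omega,
      PySem.List.pyRange_one_singleton]
    simp [pvH]
  | succ c ih =>
    intro k y hk _
    rw [show (k + ((c+1 : Nat) : Int) + 1) = (k+1) + (c : Int) + 1 by push_cast; ring,
      PySem.List.pyRange_one_cons (by omega : k < (k+1) + (c : Int) + 1)]
    simp only [List.foldl_cons]
    rw [ih (k + 1) (y + pvProd f k * g k) (by omega) rfl]
    have hp : pvProd f (k + 1) = pvProd f k * f k := by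
      have := pvProd_succ f (k + 1) (by omega)
      simpa using this
    rw [hp, pvH]
    ring

-- B's countdown fold, indices kn down to 1, starting from pvH … c (kn+1)
theorem pvB_fold (f g : Int → Int) : ∀ (kn c : Nat),
    (PySem.List.pyRange (kn : Int) 0 (-1)).foldl
      (fun r i => g i + f i * r) (pvH f g c ((kn : Int) + 1))
    = pvH f g (c + kn) 1 := by
  intro kn
  induction kn with
  | zero =>
    intro c
    simp [PySem.List.pyRange_neg_one_eq_nil (le_refl (0 : Int))]
  | succ kn ih =>
    intro c
    rw [PySem.List.pyRange_neg_one_cons (by omega : (0:Int) < ((kn+1 : Nat) : Int))]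
    simp only [List.foldl_cons]
    have h1 : (((kn+1 : Nat) : Int)) - 1 = (kn : Int) := by push_cast; ring
    have h2 : g ((kn+1 : Nat) : Int) + f ((kn+1 : Nat) : Int) * pvH f g c (((kn+1 : Nat) : Int) + 1)
        = pvH f g (c + 1) ((kn : Int) + 1) := by
      rw [pvH]; push_cast; ring_nf
    rw [h1, h2, ih (c + 1)]
    congr 1
    omega

theorem pvProd_one (f : Int → Int) : pvProd f 1 = f 0 := by
  unfold pvProd
  norm_num [PySem.List.pyRange_one]

-- ===== VERDICT =====
theorem newton_divided_eq_spec : Claim_equal_newton_divided_eq := by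
  intro x_pred x table _ _
  unfold Spec_newton_divided_eq newton_divided_eq newton_divided_eq_alt
  set f : Int → Int := fun j => x_pred - PySem.List.pyGetD x j 0 with hf
  set g : Int → Int := fun i => PySem.List.pyGetD (PySem.List.pyGetD table i []) 0 0 with hg
  by_cases hn : (table.length : Int) ≤ 2
  · simp only [hn, if_true]
    rw [PySem.List.pyRange_one_eq_nil (by omega : (table.length : Int) - 1 ≤ 1)]
    rfl
  · simp only [hn, if_false]
    -- n ≥ 3; write the outer bound as 1 + (m-1) + 1 with m = n - 2 ≥ 1
    set n : Int := (table.length : Int) with hndef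
    have h3 : 3 ≤ n := by omega
    obtain ⟨c, hc⟩ : ∃ c : Nat, n = (c : Int) + 3 := by
      refine ⟨(n - 3).toNat, by omega⟩
    have hA : (PySem.List.pyRange 1 (n - 1) 1).foldl
        (fun y_pred i =>
          y_pred + ((PySem.List.pyRange 0 i 1).foldl
            (fun temp j => temp * (x_pred - PySem.List.pyGetD x j 0)) 1)
            * PySem.List.pyGetD (PySem.List.pyGetD table i []) 0 0) (g 0)
        = g 0 + pvProd f 1 * pvH f g c 1 := by
      have := pvA_fold f g c 1 (g 0) le_rfl rfl
      rw [show (1 : Int) + (c : Int) + 1 = n - 1 by omega] at this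
      simpa [pvProd, hf, hg] using this
    have hB : (PySem.List.pyRange (n - 3) 0 (-1)).foldl
        (fun r i => g i + f i * r) (g (n - 2))
        = pvH f g c 1 := by
      have hstart : g (n - 2) = pvH f g 0 (n - 3 + 1) := by
        rw [pvH]; congr 1; omega
      have := pvB_fold f g (n - 3).toNat 0
      rw [show (((n - 3).toNat : Nat) : Int) = n - 3 by omega, ← hstart] at this
      rw [this]
      congr 1
      omega
    rw [hA, hB, pvProd_one]
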